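-- pv_equiv track=rewrite | github.com/photonized/ITI1120 | Official Lab Solutions/lab5-solutions/ah.py | ah_v2
-- ===== SOURCE A (Python) =====
-- def ah_v2(l,x,y):
--      '''
--      Precondition: x <= y
--                    and list l contains numbers only or strings only
--      '''
--      counter=0
--      min_in_range = None
--      for item in l:
--           if item>=x and item <=y:
--                counter=counter+1
--                if(min_in_range==None or item<=min_in_range):
--                     min_in_range=item
--
--      return(counter,min_in_range)
-- ===== SOURCE B (Python) =====
-- def _bisect_left(a, t):
--     lo, hi = 0, len(a)
--     while lo < hi:
--         mid = (lo + hi) // 2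
--         if a[mid] < t:
--             lo = mid + 1
--         else:
--             hi = mid
--     return lo
--
--
-- def _bisect_right(a, t):
--     lo, hi = 0, len(a)
--     while lo < hi:
--         mid = (lo + hi) // 2
--         if t < a[mid]:
--             hi = mid
--         else:
--             lo = mid + 1
--     return lo
--
--
-- def ah_v2(l, x, y):
--     s = sorted(l)
--     lo = _bisect_left(s, x)
--     hi = _bisect_right(s, y)
--     if lo < hi:
--         return (hi - lo, s[lo])
--     return (0, None)
-- ===== Notes on version B (the rewrite author's own statement) =====
-- stated objective: alternative
-- what changed: Instead of A's single fused scan with a counter and running minimum, B sorts the list and locates the range [x,y] with two binary searches: the count is the index difference and the minimum is the element at the left boundary; it trades A's O(n) scan for an O(n log n) sort plus O(log n) searches.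
import Mathlib
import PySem

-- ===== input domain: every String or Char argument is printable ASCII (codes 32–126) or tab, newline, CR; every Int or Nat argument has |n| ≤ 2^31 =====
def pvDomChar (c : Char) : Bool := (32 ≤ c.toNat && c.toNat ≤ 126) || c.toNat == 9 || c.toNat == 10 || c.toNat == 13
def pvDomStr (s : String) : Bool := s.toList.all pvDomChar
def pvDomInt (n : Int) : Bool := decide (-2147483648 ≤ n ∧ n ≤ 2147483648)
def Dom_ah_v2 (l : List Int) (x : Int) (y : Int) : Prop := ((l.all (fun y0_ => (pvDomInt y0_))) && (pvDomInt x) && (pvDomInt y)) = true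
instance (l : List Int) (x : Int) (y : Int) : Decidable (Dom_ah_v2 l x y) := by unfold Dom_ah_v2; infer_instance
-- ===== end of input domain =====

-- B replaces A's fused counter/running-min scan by sort + two binary searches
-- (count = index difference, min = element at the left boundary); objective: alternative.

-- ===== PORT A =====
-- fused loop: counter and running min updated together, branch order as in A
def ah_v2 (l : List Int) (x : Int) (y : Int) : Int × Option Int :=
  l.foldl
    (fun (st : Int × Option Int) item =>
      if item ≥ x ∧ item ≤ y then
        (st.1 + 1,
          match st.2 with
          | none => some item
          | some m => if item ≤ m then some item else some m)
      else st)
    (0, none)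

-- ===== PORT B =====
-- s = sorted(l); lo = _bisect_left(s, x); hi = _bisect_right(s, y);
-- Source B's _bisect_left/_bisect_right are exactly the standard bisect loops, ported as the
-- prelude's PySem.List.bisectLeft/bisectRight (the same lo/hi halving loop).
-- s[lo] is ported as getD: the index is in range whenever it is read (lo < hi ≤ len s).
def ah_v2_alt (l : List Int) (x : Int) (y : Int) : Int × Option Int :=
  let s := PySem.List.sorted l (fun v => v) false
  let lo := PySem.List.bisectLeft s x
  let hi := PySem.List.bisectRight s y
  if lo < hi then ((hi : Int) - (lo : Int), some (s.getD lo 0)) else (0, none)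

-- ===== PRECONDITION & SPEC =====
def Spec_ah_v2 (l : List Int) (x : Int) (y : Int) (out : Int × Option Int) : Prop := out = ah_v2_alt l x y
instance (l : List Int) (x : Int) (y : Int) (out : Int × Option Int) : Decidable (Spec_ah_v2 l x y out) := by unfold Spec_ah_v2; infer_instance

-- ===== CLAIM (what is proved, stated in full; the proofs are below) =====
def Claim_equal_ah_v2 : Prop := ∀ (l : List Int) (x : Int) (y : Int), Dom_ah_v2 l x y → Spec_ah_v2 l x y (ah_v2 l x y)

-- ===== LEMMAS AND PROOFS =====

-- A's min-updating step, isolated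
def pvMinStep (m : Option Int) (item : Int) : Option Int :=
  match m with
  | none => some item
  | some mm => if item ≤ mm then some item else some mm

-- A's fold equals: count of the filtered list, and the min-fold over the filtered list
theorem ah_fold_char (x y : Int) (l : List Int) (c : Int) (m : Option Int) :
    l.foldl
      (fun (st : Int × Option Int) item =>
        if item ≥ x ∧ item ≤ y then (st.1 + 1, pvMinStep st.2 item) else st)
      (c, m)
    = (c + ((l.filter (fun i => x ≤ i && i ≤ y)).length : Int),
       (l.filter (fun i => x ≤ i && i ≤ y)).foldl pvMinStep m) := by
  induction l generalizing c m with
  | nil => simp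
  | cons a t ih =>
    by_cases h : a ≥ x ∧ a ≤ y
    · simp only [List.foldl_cons, List.filter_cons, if_pos h, ih]
      have hb : (x ≤ a && a ≤ y) = true := by
        simp only [Bool.and_eq_true, decide_eq_true_eq]; exact ⟨h.1, h.2⟩
      simp [hb]; omega
    · simp only [List.foldl_cons, List.filter_cons, if_neg h, ih]
      have hb : (x ≤ a && a ≤ y) = false := by
        simp only [Bool.and_eq_false_iff, decide_eq_false_iff_not]; omega
      simp [hb]

-- folding pvMinStep from a seed is the running min
theorem minStep_fold_some (t : List Int) (a : Int) :
    t.foldl pvMinStep (some a) = some (t.foldl min a) := by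
  induction t generalizing a with
  | nil => rfl
  | cons b t ih =>
    simp only [List.foldl_cons, pvMinStep]
    split_ifs with h
    · rw [ih]; have hm : min a b = b := by omega
      rw [hm]
    · rw [ih]; have hm : min a b = a := by omega
      rw [hm]

-- the running min is a member of the list …
theorem foldl_min_mem (t : List Int) (a : Int) : t.foldl min a ∈ a :: t := by
  induction t generalizing a with
  | nil => simp
  | cons b t ih =>
    simp only [List.foldl_cons]
    rcases List.mem_cons.mp (ih (min a b)) with h | h
    · rw [h]
      rcases min_choice a b with hm | hm <;> rw [hm] <;> simp
    · simp [h]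

-- … and a lower bound of the seed and of every element
theorem foldl_min_le_init (t : List Int) (a : Int) : t.foldl min a ≤ a := by
  induction t generalizing a with
  | nil => exact le_refl a
  | cons b t ih =>
    simp only [List.foldl_cons]
    exact le_trans (ih (min a b)) (min_le_left a b)

theorem foldl_min_le_mem (t : List Int) (a : Int) : ∀ b ∈ t, t.foldl min a ≤ b := by
  induction t generalizing a with
  | nil => intro b hb; simp at hb
  | cons c t ih =>
    intro b hb
    simp only [List.foldl_cons]
    rcases List.mem_cons.mp hb with h | h
    · rw [h]
      exact le_trans (foldl_min_le_init t (min a c)) (min_le_right a c)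
    · exact ih (min a c) b h

-- countP from an indexed characterisation of the predicate as a window [lo, hi)
theorem countP_window (p : Int → Bool) :
    ∀ (s : List Int) (lo hi : Nat), hi ≤ s.length →
    (∀ j (hj : j < s.length), p s[j] = true ↔ (lo ≤ j ∧ j < hi)) →
    s.countP p = hi - lo := by
  intro s
  induction s with
  | nil => intro lo hi h _; simp at h ⊢; omega
  | cons a t ih =>
    intro lo hi hlen hchar
    have h0 := hchar 0 (by simp)
    simp only [List.getElem_cons_zero] at h0
    by_cases hpa : p a = true
    · obtain ⟨hlo0, hhi0⟩ := h0.mp hpa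
      have hlo : lo = 0 := by omega
      have ht : t.countP p = (hi - 1) - 0 := by
        apply ih 0 (hi - 1) (by simp at hlen; omega)
        intro j hj
        have := hchar (j + 1) (by simp; omega)
        simp only [List.getElem_cons_succ] at this
        rw [this]; omega
      rw [List.countP_cons, ht, hlo]
      simp [hpa]
      omega
    · have hnot : ¬ (lo ≤ 0 ∧ 0 < hi) := fun h => hpa (h0.mpr h)
      have ht : t.countP p = (hi - 1) - (lo - 1) := by
        apply ih (lo - 1) (hi - 1) (by simp at hlen; omega)
        intro j hj
        have := hchar (j + 1) (by simp; omega)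
        simp only [List.getElem_cons_succ] at this
        rw [this]; omega
      rw [List.countP_cons, ht]
      simp [hpa]
      omega

-- ===== VERDICT (by name: the statement is the Claim_ definition above) =====
theorem ah_v2_spec : Claim_equal_ah_v2 := by
  intro l x y _
  unfold Spec_ah_v2 ah_v2 ah_v2_alt
  -- A's side: count and running min of the filtered list
  have hA := ah_fold_char x y l 0 none
  simp only [pvMinStep] at hA
  rw [hA]
  set p : Int → Bool := fun i => x ≤ i && i ≤ y with hp
  set s := PySem.List.sorted l (fun v => v) false with hs
  set lo := PySem.List.bisectLeft s x with hlo
  set hi := PySem.List.bisectRight s y with hhi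
  have hsort : s.Pairwise (fun a b => a ≤ b) := by
    have := PySem.List.sorted_pairwise l (fun v => v)
    simpa [hs] using this
  obtain ⟨hbl1, hbl2, hbl3⟩ := PySem.List.bisectLeft_spec s x hsort
  obtain ⟨hbr1, hbr2, hbr3⟩ := PySem.List.bisectRight_spec s y hsort
  have hperm : s.Perm l := PySem.List.sorted_perm l (fun v => v) false
  -- the window characterisation of p on s
  have hchar : ∀ j (hj : j < s.length), p s[j] = true ↔ (lo ≤ j ∧ j < hi) := by
    intro j hj
    constructor
    · intro hpj
      simp only [hp, Bool.and_eq_true, decide_eq_true_eq] at hpj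
      constructor
      · by_contra h
        exact absurd hpj.1 (by have := hbl2 j hj (by omega); omega)
      · by_contra h
        exact absurd hpj.2 (by have := hbr3 j hj (by omega); omega)
    · intro ⟨h1, h2⟩
      have hx := hbl3 j hj h1
      have hy := hbr2 j hj h2
      simp only [hp, Bool.and_eq_true, decide_eq_true_eq]
      exact ⟨hx, hy⟩
  -- count: both filtered lists have length hi - lo
  have hcount : (l.filter p).length = hi - lo := by
    have h1 : (l.filter p).length = (s.filter p).length :=
      ((hperm.filter p).length_eq).symm
    rw [h1, ← List.countP_eq_length_filter]
    exact countP_window p s lo hi hbr1 hchar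
  by_cases hcase : lo < hi
  · -- nonempty window
    have hlolen : lo < s.length := by omega
    set v : Int := s[lo] with hv
    have hgetD : s.getD lo 0 = v := List.getD_eq_getElem s 0 hlolen
    have hpv : p v = true := (hchar lo hlolen).mpr ⟨le_refl _, hcase⟩
    -- v is in the filtered list, and a lower bound of it
    have hvmem : v ∈ l.filter p := by
      rw [List.mem_filter]
      exact ⟨hperm.mem_iff.mp (List.getElem_mem hlolen), hpv⟩
    have hvle : ∀ b ∈ l.filter p, v ≤ b := by
      intro b hb
      rw [List.mem_filter] at hb
      obtain ⟨j, hj, hjb⟩ := List.mem_iff_getElem.mp (hperm.mem_iff.mpr hb.1)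
      have hjlo : lo ≤ j := by
        by_contra h
        have := hbl2 j hj (by omega)
        have hbx : x ≤ b := by
          have := hb.2; simp only [hp, Bool.and_eq_true, decide_eq_true_eq] at this
          exact this.1
        omega
      have := PySem.List.sorted_id_getElem_mono l (p := lo) (q := j) hjlo (by simpa [hs] using hj)
      simp only [← hs] at this
      omega
    -- the filtered list is nonempty: its min-fold is v
    obtain ⟨a, t, hft⟩ : ∃ a t, l.filter p = a :: t := by
      rcases hfe : l.filter p with _ | ⟨a, t⟩
      · rw [hfe] at hcount; simp at hcount; omega
      · exact ⟨a, t, rfl⟩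
    have hmin : (l.filter p).foldl pvMinStep none = some v := by
      rw [hft]
      simp only [List.foldl_cons, pvMinStep, minStep_fold_some]
      have hm := foldl_min_mem t a
      rw [hft] at hvmem hvle
      have h1 : v ≤ t.foldl min a := hvle _ hm
      have h2 : t.foldl min a ≤ v := by
        rcases List.mem_cons.mp hvmem with h | h
        · rw [h]; exact foldl_min_le_init t a
        · exact foldl_min_le_mem t a v h
      exact congrArg some (by omega)
    rw [if_pos hcase, hmin, hcount, hgetD, Prod.mk.injEq]
    exact ⟨by rw [← hlo, ← hhi]; omega, rfl⟩
  · -- empty window: filter is empty, both sides (0, none)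
    have h0 : (l.filter p).length = 0 := by omega
    have hfe : l.filter p = [] := List.length_eq_zero_iff.mp h0
    rw [if_neg hcase, hfe]
    simp
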